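-- pv_equiv track=rewrite | github.com/hydroshare/hydroshare | hs_auth_proxy/api/lib/s3_auth.py | get_s3_action_from_request
-- ===== SOURCE A (Python) =====
-- def get_s3_action_from_request(method: str, path: str, query_params: dict) -> str:
--     """Map HTTP method, path, and query parameters to an S3 action string."""
--     if 'uploads' in query_params:
--         return 's3:ListMultipartUploadParts'
--     if 'uploadId' in query_params:
--         if method == 'POST':
--             return 's3:CompleteMultipartUpload'
--         elif method == 'DELETE':
--             return 's3:AbortMultipartUpload'
--         elif method == 'PUT':
--             return 's3:UploadPart'
--     if 'delete' in query_params: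
--         return 's3:DeleteObjects'
--     if 'tagging' in query_params:
--         if method == 'GET':
--             return 's3:GetObjectTagging'
--         elif method in ['PUT', 'POST']:
--             return 's3:PutObjectTagging'
--         elif method == 'DELETE':
--             return 's3:DeleteObjectTagging'
--     if 'acl' in query_params:
--         if method == 'GET':
--             return 's3:GetObjectAcl'
--         elif method in ['PUT', 'POST']:
--             return 's3:PutObjectAcl'
--     if 'retention' in query_params:
--         if method == 'GET':
--             return 's3:GetObjectRetention'
--         elif method in ['PUT', 'POST']:
--             return 's3:PutObjectRetention'
--     if 'legal-hold' in query_params: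
--         if method == 'GET':
--             return 's3:GetObjectLegalHold'
--         elif method in ['PUT', 'POST']:
--             return 's3:PutObjectLegalHold'
--     if 'location' in query_params:
--         return 's3:GetBucketLocation'
--     if 'object-lock' in query_params:
--         return 's3:GetBucketObjectLockConfiguration'
--
--     path_parts = [p for p in path.split('/') if p]
--
--     if len(path_parts) == 0:
--         if method == 'GET':
--             return 's3:ListAllMyBuckets'
--     elif len(path_parts) == 1:
--         if method == 'GET':
--             return 's3:ListBucket'
--         elif method == 'PUT':
--             return 's3:CreateBucket'
--         elif method == 'DELETE':
--             return 's3:DeleteBucket'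
--         elif method == 'HEAD':
--             return 's3:HeadBucket'
--     else:
--         if method == 'GET':
--             return 's3:GetObject'
--         elif method == 'PUT':
--             return 's3:PutObject'
--         elif method == 'DELETE':
--             return 's3:DeleteObject'
--         elif method == 'HEAD':
--             return 's3:HeadObject'
--         elif method == 'POST':
--             return 's3:PutObject'
--
--     return 's3:Unknown'
-- ===== SOURCE B (Python) =====
-- # Method-first dispatch ("partial evaluation" on the HTTP method): the generic
-- # rules are specialized per method into flat (param, action) lists with all
-- # fallthrough for unmatched methods resolved away at definition time; runtime
-- # is one dict lookup on the method plus one flat scan, no method tests inside.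
--
-- _CONSTS = [('uploads', 's3:ListMultipartUploadParts'),
--            ('delete', 's3:DeleteObjects'),
--            ('location', 's3:GetBucketLocation'),
--            ('object-lock', 's3:GetBucketObjectLockConfiguration')]
--
-- _BY_METHOD = {
--     'GET': ([('uploads', 's3:ListMultipartUploadParts'),
--              ('delete', 's3:DeleteObjects'),
--              ('tagging', 's3:GetObjectTagging'),
--              ('acl', 's3:GetObjectAcl'),
--              ('retention', 's3:GetObjectRetention'),
--              ('legal-hold', 's3:GetObjectLegalHold'),
--              ('location', 's3:GetBucketLocation'),
--              ('object-lock', 's3:GetBucketObjectLockConfiguration')],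
--             {0: 's3:ListAllMyBuckets', 1: 's3:ListBucket', 2: 's3:GetObject'}),
--     'PUT': ([('uploads', 's3:ListMultipartUploadParts'),
--              ('uploadId', 's3:UploadPart'),
--              ('delete', 's3:DeleteObjects'),
--              ('tagging', 's3:PutObjectTagging'),
--              ('acl', 's3:PutObjectAcl'),
--              ('retention', 's3:PutObjectRetention'),
--              ('legal-hold', 's3:PutObjectLegalHold'),
--              ('location', 's3:GetBucketLocation'),
--              ('object-lock', 's3:GetBucketObjectLockConfiguration')],
--             {1: 's3:CreateBucket', 2: 's3:PutObject'}),
--     'POST': ([('uploads', 's3:ListMultipartUploadParts'),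
--               ('uploadId', 's3:CompleteMultipartUpload'),
--               ('delete', 's3:DeleteObjects'),
--               ('tagging', 's3:PutObjectTagging'),
--               ('acl', 's3:PutObjectAcl'),
--               ('retention', 's3:PutObjectRetention'),
--               ('legal-hold', 's3:PutObjectLegalHold'),
--               ('location', 's3:GetBucketLocation'),
--               ('object-lock', 's3:GetBucketObjectLockConfiguration')],
--              {2: 's3:PutObject'}),
--     'DELETE': ([('uploads', 's3:ListMultipartUploadParts'),
--                 ('uploadId', 's3:AbortMultipartUpload'),
--                 ('delete', 's3:DeleteObjects'),
--                 ('tagging', 's3:DeleteObjectTagging'),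
--                 ('location', 's3:GetBucketLocation'),
--                 ('object-lock', 's3:GetBucketObjectLockConfiguration')],
--                {1: 's3:DeleteBucket', 2: 's3:DeleteObject'}),
--     'HEAD': (_CONSTS, {1: 's3:HeadBucket', 2: 's3:HeadObject'}),
-- }
--
-- _DEFAULT = (_CONSTS, {})
--
--
-- def get_s3_action_from_request(method: str, path: str, query_params: dict) -> str:
--     """Map HTTP method, path, and query parameters to an S3 action string."""
--     query_rules, path_rules = _BY_METHOD.get(method, _DEFAULT)
--     for name, action in query_rules:
--         if name in query_params:
--             return action
--     n_parts = sum(1 for p in path.split('/') if p)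
--     return path_rules.get(min(n_parts, 2), 's3:Unknown')
-- ===== Notes on version B (the rewrite author's own statement) =====
-- stated objective: alternative
-- what changed: B dispatches on the HTTP method first, selecting a per-method flat (param, action) rule list in which A's method tests and fallthrough for unmatched methods are resolved away at definition time; runtime is one method lookup, one flat scan of query params, and a length-bucketed path lookup.
import Mathlib
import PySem

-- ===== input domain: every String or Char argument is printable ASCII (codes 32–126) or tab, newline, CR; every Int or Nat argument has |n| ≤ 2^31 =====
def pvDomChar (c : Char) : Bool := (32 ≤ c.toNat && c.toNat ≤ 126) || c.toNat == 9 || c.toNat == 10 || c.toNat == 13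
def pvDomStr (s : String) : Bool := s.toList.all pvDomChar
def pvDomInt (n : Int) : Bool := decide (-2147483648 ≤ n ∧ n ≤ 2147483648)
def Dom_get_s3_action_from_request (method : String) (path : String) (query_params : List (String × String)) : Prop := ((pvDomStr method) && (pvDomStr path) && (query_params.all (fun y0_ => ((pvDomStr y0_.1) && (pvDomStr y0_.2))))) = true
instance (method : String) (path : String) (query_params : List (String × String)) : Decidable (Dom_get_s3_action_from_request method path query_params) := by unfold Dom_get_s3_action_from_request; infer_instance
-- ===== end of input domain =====

-- B dispatches on the method first, into a per-method flat rule list with all of A's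
-- method tests and fallthrough resolved at definition time (objective: alternative).

-- 'k in query_params' (Python dict key membership; exact for the association-list convention)
def pvMem (qp : List (String × String)) (k : String) : Bool := qp.any (fun kv => kv.1 == k)

-- ===== PORT A =====
-- each pvA_s* helper is the continuation after one of A's early-return blocks, in order
def pvA_path (method : String) (path : String) : String :=
  let path_parts := ((PySem.Chars.splitOn path.toList ['/']).map List.asString).filter (fun p => !(p == ""))
  if path_parts.length == 0 then
    (if method == "GET" then "s3:ListAllMyBuckets" else "s3:Unknown")
  else if path_parts.length == 1 then
    (if method == "GET" then "s3:ListBucket"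
     else if method == "PUT" then "s3:CreateBucket"
     else if method == "DELETE" then "s3:DeleteBucket"
     else if method == "HEAD" then "s3:HeadBucket"
     else "s3:Unknown")
  else
    (if method == "GET" then "s3:GetObject"
     else if method == "PUT" then "s3:PutObject"
     else if method == "DELETE" then "s3:DeleteObject"
     else if method == "HEAD" then "s3:HeadObject"
     else if method == "POST" then "s3:PutObject"
     else "s3:Unknown")

def pvA_s8 (method path : String) (qp : List (String × String)) : String :=
  if pvMem qp "object-lock" then "s3:GetBucketObjectLockConfiguration" else pvA_path method path

def pvA_s7 (method path : String) (qp : List (String × String)) : String :=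
  if pvMem qp "location" then "s3:GetBucketLocation" else pvA_s8 method path qp

def pvA_s6 (method path : String) (qp : List (String × String)) : String :=
  if pvMem qp "legal-hold" then
    (if method == "GET" then "s3:GetObjectLegalHold"
     else if (method == "PUT" || method == "POST") then "s3:PutObjectLegalHold"
     else pvA_s7 method path qp)
  else pvA_s7 method path qp

def pvA_s5 (method path : String) (qp : List (String × String)) : String :=
  if pvMem qp "retention" then
    (if method == "GET" then "s3:GetObjectRetention"
     else if (method == "PUT" || method == "POST") then "s3:PutObjectRetention"
     else pvA_s6 method path qp)
  else pvA_s6 method path qp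

def pvA_s4 (method path : String) (qp : List (String × String)) : String :=
  if pvMem qp "acl" then
    (if method == "GET" then "s3:GetObjectAcl"
     else if (method == "PUT" || method == "POST") then "s3:PutObjectAcl"
     else pvA_s5 method path qp)
  else pvA_s5 method path qp

def pvA_s3 (method path : String) (qp : List (String × String)) : String :=
  if pvMem qp "tagging" then
    (if method == "GET" then "s3:GetObjectTagging"
     else if (method == "PUT" || method == "POST") then "s3:PutObjectTagging"
     else if method == "DELETE" then "s3:DeleteObjectTagging"
     else pvA_s4 method path qp)
  else pvA_s4 method path qp

def pvA_s2 (method path : String) (qp : List (String × String)) : String :=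
  if pvMem qp "delete" then "s3:DeleteObjects" else pvA_s3 method path qp

def pvA_s1 (method path : String) (qp : List (String × String)) : String :=
  if pvMem qp "uploadId" then
    (if method == "POST" then "s3:CompleteMultipartUpload"
     else if method == "DELETE" then "s3:AbortMultipartUpload"
     else if method == "PUT" then "s3:UploadPart"
     else pvA_s2 method path qp)
  else pvA_s2 method path qp

def get_s3_action_from_request (method : String) (path : String) (query_params : List (String × String)) : String :=
  if pvMem query_params "uploads" then "s3:ListMultipartUploadParts"
  else pvA_s1 method path query_params

-- ===== PORT B =====
-- per-method specialized flat rule lists (Source B's _BY_METHOD / _CONSTS / _DEFAULT)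
def pvConsts : List (String × String) :=
  [("uploads", "s3:ListMultipartUploadParts"),
   ("delete", "s3:DeleteObjects"),
   ("location", "s3:GetBucketLocation"),
   ("object-lock", "s3:GetBucketObjectLockConfiguration")]

def pvByMethod : List (String × (List (String × String) × List (Nat × String))) :=
  [("GET",
    ([("uploads", "s3:ListMultipartUploadParts"),
      ("delete", "s3:DeleteObjects"),
      ("tagging", "s3:GetObjectTagging"),
      ("acl", "s3:GetObjectAcl"),
      ("retention", "s3:GetObjectRetention"),
      ("legal-hold", "s3:GetObjectLegalHold"),
      ("location", "s3:GetBucketLocation"),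
      ("object-lock", "s3:GetBucketObjectLockConfiguration")],
     [(0, "s3:ListAllMyBuckets"), (1, "s3:ListBucket"), (2, "s3:GetObject")])),
   ("PUT",
    ([("uploads", "s3:ListMultipartUploadParts"),
      ("uploadId", "s3:UploadPart"),
      ("delete", "s3:DeleteObjects"),
      ("tagging", "s3:PutObjectTagging"),
      ("acl", "s3:PutObjectAcl"),
      ("retention", "s3:PutObjectRetention"),
      ("legal-hold", "s3:PutObjectLegalHold"),
      ("location", "s3:GetBucketLocation"),
      ("object-lock", "s3:GetBucketObjectLockConfiguration")],
     [(1, "s3:CreateBucket"), (2, "s3:PutObject")])),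
   ("POST",
    ([("uploads", "s3:ListMultipartUploadParts"),
      ("uploadId", "s3:CompleteMultipartUpload"),
      ("delete", "s3:DeleteObjects"),
      ("tagging", "s3:PutObjectTagging"),
      ("acl", "s3:PutObjectAcl"),
      ("retention", "s3:PutObjectRetention"),
      ("legal-hold", "s3:PutObjectLegalHold"),
      ("location", "s3:GetBucketLocation"),
      ("object-lock", "s3:GetBucketObjectLockConfiguration")],
     [(2, "s3:PutObject")])),
   ("DELETE",
    ([("uploads", "s3:ListMultipartUploadParts"),
      ("uploadId", "s3:AbortMultipartUpload"),
      ("delete", "s3:DeleteObjects"),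
      ("tagging", "s3:DeleteObjectTagging"),
      ("location", "s3:GetBucketLocation"),
      ("object-lock", "s3:GetBucketObjectLockConfiguration")],
     [(1, "s3:DeleteBucket"), (2, "s3:DeleteObject")])),
   ("HEAD", (pvConsts, [(1, "s3:HeadBucket"), (2, "s3:HeadObject")]))]

def pvDefault : List (String × String) × List (Nat × String) := (pvConsts, [])

-- _BY_METHOD.get(method, _DEFAULT)  (first match in the literal table)
def pvLookupMethod (m : String) :
    List (String × (List (String × String) × List (Nat × String))) →
    List (String × String) × List (Nat × String)
  | [] => pvDefault
  | (k, v) :: rest => if m == k then v else pvLookupMethod m rest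

-- the flat 'for name, action in query_rules' loop
def pvFlatScan (qp : List (String × String)) : List (String × String) → Option String
  | [] => none
  | (name, act) :: rest => if pvMem qp name then some act else pvFlatScan qp rest

-- path_rules.get(bucket, 's3:Unknown')
def pvGetNat (key : Nat) : List (Nat × String) → Option String
  | [] => none
  | (k, v) :: rest => if key == k then some v else pvGetNat key rest

def get_s3_action_from_request_alt (method : String) (path : String) (query_params : List (String × String)) : String :=
  let rules := pvLookupMethod method pvByMethod
  let n_parts := (((PySem.Chars.splitOn path.toList ['/']).map List.asString).filter (fun p => !(p == ""))).length
  -- the flat scan returns its first hit, else falls through to the path lookup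
  (pvFlatScan query_params rules.1).getD ((pvGetNat (min n_parts 2) rules.2).getD "s3:Unknown")

-- ===== PRECONDITION & SPEC =====
def Spec_get_s3_action_from_request (method : String) (path : String) (query_params : List (String × String)) (out : String) : Prop := out = get_s3_action_from_request_alt method path query_params
instance (method : String) (path : String) (query_params : List (String × String)) (out : String) : Decidable (Spec_get_s3_action_from_request method path query_params out) := by unfold Spec_get_s3_action_from_request; infer_instance

-- ===== CLAIM (what is proved, stated in full; the proofs are below) =====
def Claim_equal_get_s3_action_from_request : Prop := ∀ (method : String) (path : String) (query_params : List (String × String)), Dom_get_s3_action_from_request method path query_params → Spec_get_s3_action_from_request method path query_params (get_s3_action_from_request method path query_params)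

-- ===== LEMMAS AND PROOFS =====
-- proof-side machinery: A is first characterized as a priority scan with
-- fallthrough (pvScan over pvQueryRules), then that scan is compared per method
-- with B's method-specialized flat scan.
inductive PvRule where
  | const : String → PvRule
  | table : List (String × String) → PvRule

def pvGet (key : String) : List (String × String) → Option String
  | [] => none
  | (k, v) :: rest => if key == k then some v else pvGet key rest

def pvScan (method : String) (qp : List (String × String)) : List (String × PvRule) → Option String
  | [] => none
  | (name, rule) :: rest =>
    if pvMem qp name then
      match rule with
      | .const s => some s
      | .table t =>
        match pvGet method t with
        | some a => some a
        | none => pvScan method qp rest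
    else pvScan method qp rest

def pvQueryRules : List (String × PvRule) :=
  [("uploads", .const "s3:ListMultipartUploadParts"),
   ("uploadId", .table [("POST", "s3:CompleteMultipartUpload"),
                        ("DELETE", "s3:AbortMultipartUpload"),
                        ("PUT", "s3:UploadPart")]),
   ("delete", .const "s3:DeleteObjects"),
   ("tagging", .table [("GET", "s3:GetObjectTagging"),
                       ("PUT", "s3:PutObjectTagging"),
                       ("POST", "s3:PutObjectTagging"),
                       ("DELETE", "s3:DeleteObjectTagging")]),
   ("acl", .table [("GET", "s3:GetObjectAcl"),
                   ("PUT", "s3:PutObjectAcl"),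
                   ("POST", "s3:PutObjectAcl")]),
   ("retention", .table [("GET", "s3:GetObjectRetention"),
                         ("PUT", "s3:PutObjectRetention"),
                         ("POST", "s3:PutObjectRetention")]),
   ("legal-hold", .table [("GET", "s3:GetObjectLegalHold"),
                          ("PUT", "s3:PutObjectLegalHold"),
                          ("POST", "s3:PutObjectLegalHold")]),
   ("location", .const "s3:GetBucketLocation"),
   ("object-lock", .const "s3:GetBucketObjectLockConfiguration")]

def pvR8 : List (String × PvRule) := [("object-lock", .const "s3:GetBucketObjectLockConfiguration")]
def pvR7 : List (String × PvRule) := ("location", .const "s3:GetBucketLocation") :: pvR8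
def pvR6 : List (String × PvRule) :=
  ("legal-hold", .table [("GET", "s3:GetObjectLegalHold"), ("PUT", "s3:PutObjectLegalHold"), ("POST", "s3:PutObjectLegalHold")]) :: pvR7
def pvR5 : List (String × PvRule) :=
  ("retention", .table [("GET", "s3:GetObjectRetention"), ("PUT", "s3:PutObjectRetention"), ("POST", "s3:PutObjectRetention")]) :: pvR6
def pvR4 : List (String × PvRule) :=
  ("acl", .table [("GET", "s3:GetObjectAcl"), ("PUT", "s3:PutObjectAcl"), ("POST", "s3:PutObjectAcl")]) :: pvR5
def pvR3 : List (String × PvRule) :=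
  ("tagging", .table [("GET", "s3:GetObjectTagging"), ("PUT", "s3:PutObjectTagging"), ("POST", "s3:PutObjectTagging"), ("DELETE", "s3:DeleteObjectTagging")]) :: pvR4
def pvR2 : List (String × PvRule) := ("delete", .const "s3:DeleteObjects") :: pvR3
def pvR1 : List (String × PvRule) :=
  ("uploadId", .table [("POST", "s3:CompleteMultipartUpload"), ("DELETE", "s3:AbortMultipartUpload"), ("PUT", "s3:UploadPart")]) :: pvR2

theorem pv_scan_cons (m : String) (qp : List (String × String)) (name : String) (r : PvRule) (rest : List (String × PvRule)) :
    pvScan m qp ((name, r) :: rest) =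
      if pvMem qp name then
        match r with
        | .const s => some s
        | .table t =>
          match pvGet m t with
          | some a => some a
          | none => pvScan m qp rest
      else pvScan m qp rest := by
  simp [pvScan]

theorem pv_l8 (m p : String) (qp : List (String × String)) :
    pvA_s8 m p qp = (pvScan m qp pvR8).getD (pvA_path m p) := by
  unfold pvA_s8 pvR8
  rw [pv_scan_cons]
  by_cases h : pvMem qp "object-lock" <;> simp [pvScan, h]

theorem pv_l7 (m p : String) (qp : List (String × String)) :
    pvA_s7 m p qp = (pvScan m qp pvR7).getD (pvA_path m p) := by
  unfold pvA_s7 pvR7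
  rw [pv_scan_cons]
  by_cases h : pvMem qp "location" <;> simp [h, pv_l8 m p qp]

theorem pv_l6 (m p : String) (qp : List (String × String)) :
    pvA_s6 m p qp = (pvScan m qp pvR6).getD (pvA_path m p) := by
  unfold pvA_s6 pvR6
  rw [pv_scan_cons]
  by_cases h : pvMem qp "legal-hold"
  · simp only [h, if_true, pvGet]
    split_ifs <;> first | rfl | exact pv_l7 m p qp | simp_all
  · simp only [h, Bool.false_eq_true, if_false]
    exact pv_l7 m p qp

theorem pv_l5 (m p : String) (qp : List (String × String)) :
    pvA_s5 m p qp = (pvScan m qp pvR5).getD (pvA_path m p) := by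
  unfold pvA_s5 pvR5
  rw [pv_scan_cons]
  by_cases h : pvMem qp "retention"
  · simp only [h, if_true, pvGet]
    split_ifs <;> first | rfl | exact pv_l6 m p qp | simp_all
  · simp only [h, Bool.false_eq_true, if_false]
    exact pv_l6 m p qp

theorem pv_l4 (m p : String) (qp : List (String × String)) :
    pvA_s4 m p qp = (pvScan m qp pvR4).getD (pvA_path m p) := by
  unfold pvA_s4 pvR4
  rw [pv_scan_cons]
  by_cases h : pvMem qp "acl"
  · simp only [h, if_true, pvGet]
    split_ifs <;> first | rfl | exact pv_l5 m p qp | simp_all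
  · simp only [h, Bool.false_eq_true, if_false]
    exact pv_l5 m p qp

theorem pv_l3 (m p : String) (qp : List (String × String)) :
    pvA_s3 m p qp = (pvScan m qp pvR3).getD (pvA_path m p) := by
  unfold pvA_s3 pvR3
  rw [pv_scan_cons]
  by_cases h : pvMem qp "tagging"
  · simp only [h, if_true, pvGet]
    split_ifs <;> first | rfl | exact pv_l4 m p qp | simp_all
  · simp only [h, Bool.false_eq_true, if_false]
    exact pv_l4 m p qp

theorem pv_l2 (m p : String) (qp : List (String × String)) :
    pvA_s2 m p qp = (pvScan m qp pvR2).getD (pvA_path m p) := by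
  unfold pvA_s2 pvR2
  rw [pv_scan_cons]
  by_cases h : pvMem qp "delete" <;> simp [h, pv_l3 m p qp]

theorem pv_l1 (m p : String) (qp : List (String × String)) :
    pvA_s1 m p qp = (pvScan m qp pvR1).getD (pvA_path m p) := by
  unfold pvA_s1 pvR1
  rw [pv_scan_cons]
  by_cases h : pvMem qp "uploadId"
  · simp only [h, if_true, pvGet]
    split_ifs <;> first | rfl | exact pv_l2 m p qp
  · simp only [h, Bool.false_eq_true, if_false]
    exact pv_l2 m p qp

theorem pv_l0 (m p : String) (qp : List (String × String)) :
    get_s3_action_from_request m p qp = (pvScan m qp pvQueryRules).getD (pvA_path m p) := by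
  unfold get_s3_action_from_request
  rw [show pvQueryRules = ("uploads", PvRule.const "s3:ListMultipartUploadParts") :: pvR1 from rfl,
      pv_scan_cons]
  by_cases h : pvMem qp "uploads" <;> simp [h, pv_l1 m p qp]

-- linearized step lemmas for both scans under getD
theorem pv_gstep (m : String) (qp : List (String × String)) (name : String) (r : PvRule)
    (rest : List (String × PvRule)) (d : String) :
    (pvScan m qp ((name, r) :: rest)).getD d =
      if pvMem qp name then
        ((match r with
          | .const s => some s
          | .table t => pvGet m t).getD ((pvScan m qp rest).getD d))
      else (pvScan m qp rest).getD d := by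
  rw [pv_scan_cons]
  by_cases h : pvMem qp name
  · cases r with
    | const s => simp [h]
    | table t => cases hg : pvGet m t <;> simp [h, hg]
  · simp [h]

theorem pv_gnil (m : String) (qp : List (String × String)) (d : String) :
    (pvScan m qp []).getD d = d := rfl

theorem pv_scan_step (qp : List (String × String)) (n a : String)
    (rest : List (String × String)) (d : String) :
    (pvFlatScan qp ((n, a) :: rest)).getD d =
      if pvMem qp n then a else (pvFlatScan qp rest).getD d := by
  simp only [pvFlatScan]
  by_cases h : pvMem qp n <;> simp [h]

theorem pv_scan_nil (qp : List (String × String)) (d : String) :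
    (pvFlatScan qp []).getD d = d := rfl

set_option maxHeartbeats 1000000 in
theorem pv_case_GET (p : String) (qp : List (String × String)) :
    (pvScan "GET" qp pvQueryRules).getD (pvA_path "GET" p) = get_s3_action_from_request_alt "GET" p qp := by
  conv_lhs => simp only [pvQueryRules, pv_gstep, pv_gnil, pvGet,
    String.reduceBEq, Bool.false_eq_true, Bool.true_eq_false, reduceIte, if_false, if_true,
    Option.getD_some, Option.getD_none, ite_self]
  conv_rhs => unfold get_s3_action_from_request_alt
  conv_rhs => simp only [pvByMethod, pvLookupMethod, pvConsts, pvDefault,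
    pv_scan_step, pv_scan_nil, String.reduceBEq, Bool.false_eq_true, Bool.true_eq_false,
    reduceIte, if_false, if_true, Option.getD_some, Option.getD_none]
  unfold pvA_path
  simp only [String.reduceBEq, Bool.false_eq_true, Bool.true_eq_false, reduceIte, if_false, if_true]
  generalize (((PySem.Chars.splitOn p.toList ['/']).map List.asString).filter (fun x => !(x == ""))).length = L
  rcases L with _ | _ | n
  · rfl
  · rfl
  · have h2 : min (n + 1 + 1) 2 = 2 := by omega
    simp only [h2, pvGetNat, Nat.reduceBEq, Bool.false_eq_true, Bool.true_eq_false, reduceIte,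
      if_false, if_true, Option.getD_some, Nat.reduceBeqDiff]
    try rfl

set_option maxHeartbeats 1000000 in
theorem pv_case_PUT (p : String) (qp : List (String × String)) :
    (pvScan "PUT" qp pvQueryRules).getD (pvA_path "PUT" p) = get_s3_action_from_request_alt "PUT" p qp := by
  conv_lhs => simp only [pvQueryRules, pv_gstep, pv_gnil, pvGet,
    String.reduceBEq, Bool.false_eq_true, Bool.true_eq_false, reduceIte, if_false, if_true,
    Option.getD_some, Option.getD_none, ite_self]
  conv_rhs => unfold get_s3_action_from_request_alt
  conv_rhs => simp only [pvByMethod, pvLookupMethod, pvConsts, pvDefault,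
    pv_scan_step, pv_scan_nil, String.reduceBEq, Bool.false_eq_true, Bool.true_eq_false,
    reduceIte, if_false, if_true, Option.getD_some, Option.getD_none]
  unfold pvA_path
  simp only [String.reduceBEq, Bool.false_eq_true, Bool.true_eq_false, reduceIte, if_false, if_true]
  generalize (((PySem.Chars.splitOn p.toList ['/']).map List.asString).filter (fun x => !(x == ""))).length = L
  rcases L with _ | _ | n
  · rfl
  · rfl
  · have h2 : min (n + 1 + 1) 2 = 2 := by omega
    simp only [h2, pvGetNat, Nat.reduceBEq, Bool.false_eq_true, Bool.true_eq_false, reduceIte,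
      if_false, if_true, Option.getD_some, Nat.reduceBeqDiff]
    try rfl

set_option maxHeartbeats 1000000 in
theorem pv_case_POST (p : String) (qp : List (String × String)) :
    (pvScan "POST" qp pvQueryRules).getD (pvA_path "POST" p) = get_s3_action_from_request_alt "POST" p qp := by
  conv_lhs => simp only [pvQueryRules, pv_gstep, pv_gnil, pvGet,
    String.reduceBEq, Bool.false_eq_true, Bool.true_eq_false, reduceIte, if_false, if_true,
    Option.getD_some, Option.getD_none, ite_self]
  conv_rhs => unfold get_s3_action_from_request_alt
  conv_rhs => simp only [pvByMethod, pvLookupMethod, pvConsts, pvDefault,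
    pv_scan_step, pv_scan_nil, String.reduceBEq, Bool.false_eq_true, Bool.true_eq_false,
    reduceIte, if_false, if_true, Option.getD_some, Option.getD_none]
  unfold pvA_path
  simp only [String.reduceBEq, Bool.false_eq_true, Bool.true_eq_false, reduceIte, if_false, if_true]
  generalize (((PySem.Chars.splitOn p.toList ['/']).map List.asString).filter (fun x => !(x == ""))).length = L
  rcases L with _ | _ | n
  · rfl
  · rfl
  · have h2 : min (n + 1 + 1) 2 = 2 := by omega
    simp only [h2, pvGetNat, Nat.reduceBEq, Bool.false_eq_true, Bool.true_eq_false, reduceIte,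
      if_false, if_true, Option.getD_some, Nat.reduceBeqDiff]
    try rfl

set_option maxHeartbeats 1000000 in
theorem pv_case_DELETE (p : String) (qp : List (String × String)) :
    (pvScan "DELETE" qp pvQueryRules).getD (pvA_path "DELETE" p) = get_s3_action_from_request_alt "DELETE" p qp := by
  conv_lhs => simp only [pvQueryRules, pv_gstep, pv_gnil, pvGet,
    String.reduceBEq, Bool.false_eq_true, Bool.true_eq_false, reduceIte, if_false, if_true,
    Option.getD_some, Option.getD_none, ite_self]
  conv_rhs => unfold get_s3_action_from_request_alt
  conv_rhs => simp only [pvByMethod, pvLookupMethod, pvConsts, pvDefault,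
    pv_scan_step, pv_scan_nil, String.reduceBEq, Bool.false_eq_true, Bool.true_eq_false,
    reduceIte, if_false, if_true, Option.getD_some, Option.getD_none]
  unfold pvA_path
  simp only [String.reduceBEq, Bool.false_eq_true, Bool.true_eq_false, reduceIte, if_false, if_true]
  generalize (((PySem.Chars.splitOn p.toList ['/']).map List.asString).filter (fun x => !(x == ""))).length = L
  rcases L with _ | _ | n
  · rfl
  · rfl
  · have h2 : min (n + 1 + 1) 2 = 2 := by omega
    simp only [h2, pvGetNat, Nat.reduceBEq, Bool.false_eq_true, Bool.true_eq_false, reduceIte,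
      if_false, if_true, Option.getD_some, Nat.reduceBeqDiff]
    try rfl

set_option maxHeartbeats 1000000 in
theorem pv_case_HEAD (p : String) (qp : List (String × String)) :
    (pvScan "HEAD" qp pvQueryRules).getD (pvA_path "HEAD" p) = get_s3_action_from_request_alt "HEAD" p qp := by
  conv_lhs => simp only [pvQueryRules, pv_gstep, pv_gnil, pvGet,
    String.reduceBEq, Bool.false_eq_true, Bool.true_eq_false, reduceIte, if_false, if_true,
    Option.getD_some, Option.getD_none, ite_self]
  conv_rhs => unfold get_s3_action_from_request_alt
  conv_rhs => simp only [pvByMethod, pvLookupMethod, pvConsts, pvDefault,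
    pv_scan_step, pv_scan_nil, String.reduceBEq, Bool.false_eq_true, Bool.true_eq_false,
    reduceIte, if_false, if_true, Option.getD_some, Option.getD_none]
  unfold pvA_path
  simp only [String.reduceBEq, Bool.false_eq_true, Bool.true_eq_false, reduceIte, if_false, if_true]
  generalize (((PySem.Chars.splitOn p.toList ['/']).map List.asString).filter (fun x => !(x == ""))).length = L
  rcases L with _ | _ | n
  · rfl
  · rfl
  · have h2 : min (n + 1 + 1) 2 = 2 := by omega
    simp only [h2, pvGetNat, Nat.reduceBEq, Bool.false_eq_true, Bool.true_eq_false, reduceIte,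
      if_false, if_true, Option.getD_some, Nat.reduceBeqDiff]
    try rfl

set_option maxHeartbeats 1000000 in
theorem pv_case_other (m p : String) (qp : List (String × String))
    (h1 : (m == "GET") = false) (h2 : (m == "PUT") = false) (h3 : (m == "POST") = false)
    (h4 : (m == "DELETE") = false) (h5 : (m == "HEAD") = false) :
    (pvScan m qp pvQueryRules).getD (pvA_path m p) = get_s3_action_from_request_alt m p qp := by
  conv_lhs => simp only [pvQueryRules, pv_gstep, pv_gnil, pvGet,
    h1, h2, h3, h4, h5, Bool.false_eq_true, reduceIte, if_false, if_true,
    Option.getD_some, Option.getD_none, ite_self]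
  conv_rhs => unfold get_s3_action_from_request_alt
  conv_rhs => simp only [pvByMethod, pvLookupMethod, pvConsts, pvDefault,
    pv_scan_step, pv_scan_nil, h1, h2, h3, h4, h5, Bool.false_eq_true, reduceIte, if_false, if_true,
    Option.getD_some, Option.getD_none]
  unfold pvA_path
  simp only [h1, h2, h3, h4, h5, Bool.false_eq_true, reduceIte, if_false, if_true, ite_self,
    pvGetNat, Option.getD_none]
  try rfl

-- ===== VERDICT (by name: the statement is the Claim_ definition above) =====
theorem get_s3_action_from_request_spec : Claim_equal_get_s3_action_from_request := by
  intro method path qp _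
  unfold Spec_get_s3_action_from_request
  rw [pv_l0]
  by_cases h1 : method = "GET"
  · subst h1; exact pv_case_GET path qp
  by_cases h2 : method = "PUT"
  · subst h2; exact pv_case_PUT path qp
  by_cases h3 : method = "POST"
  · subst h3; exact pv_case_POST path qp
  by_cases h4 : method = "DELETE"
  · subst h4; exact pv_case_DELETE path qp
  by_cases h5 : method = "HEAD"
  · subst h5; exact pv_case_HEAD path qp
  exact pv_case_other method path qp (by simpa using h1) (by simpa using h2)
    (by simpa using h3) (by simpa using h4) (by simpa using h5)
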